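-- pv_equiv track=rewrite | github.com/floft/AL | features.py | zero_crossings
-- ===== SOURCE A (Python) =====
-- def zero_crossings(data, median):
--     """ Compute zero crossings of the input array of data. Zero crossings is
--     computed as the number of times the data value crosses the median as the
--     sequence is traversed from beginning to end.
--     """
--     rel = 0
--     count = 0
--     for x in data:
--         if x < median:
--             if rel > 0:
--                 count += 1
--             rel = -1
--         elif x > median:
--             if rel < 0:
--                 count += 1
--             rel = 1
--     return count
-- ===== SOURCE B (Python) =====
-- def zero_crossings(data, median):
--     signs = [-1 if x < median else 1 for x in data if x < median or x > median]
--     return sum(a != b for a, b in zip(signs, signs[1:]))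
-- ===== Notes on version B (the rewrite author's own statement) =====
-- stated objective: simpler
-- what changed: Replaces A's running-state loop (rel/count accumulator) with a materialized +-1 sign list built by one comprehension followed by an adjacent-difference count over zipped neighbours.
import Mathlib
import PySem

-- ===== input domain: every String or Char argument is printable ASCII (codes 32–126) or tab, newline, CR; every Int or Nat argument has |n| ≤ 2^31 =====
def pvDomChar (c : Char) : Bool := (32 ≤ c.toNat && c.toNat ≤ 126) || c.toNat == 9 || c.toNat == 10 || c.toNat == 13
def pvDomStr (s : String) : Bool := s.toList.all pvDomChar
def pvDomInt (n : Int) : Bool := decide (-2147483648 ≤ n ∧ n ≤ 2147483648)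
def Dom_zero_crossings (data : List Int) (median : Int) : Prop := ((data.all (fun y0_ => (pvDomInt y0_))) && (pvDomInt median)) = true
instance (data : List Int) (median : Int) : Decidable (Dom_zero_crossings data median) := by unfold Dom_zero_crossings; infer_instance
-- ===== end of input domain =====

-- B replaces A's running-state loop with a sign list plus an adjacent-difference count (objective: simpler).

-- ===== PORT A =====
-- state (rel, count); branches in A's order
def zero_crossings (data : List Int) (median : Int) : Int :=
  (data.foldl (fun (s : Int × Int) x =>
    if x < median then (-1, if s.1 > 0 then s.2 + 1 else s.2)
    else if x > median then (1, if s.1 < 0 then s.2 + 1 else s.2)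
    else s) (0, 0)).2

-- ===== PORT B =====
def zero_crossings_alt (data : List Int) (median : Int) : Int :=
  let signs := data.filterMap (fun x =>
    if x < median ∨ x > median then some (if x < median then (-1 : Int) else 1) else none)
  ((signs.zip signs.tail).map (fun p => if p.1 ≠ p.2 then (1 : Int) else 0)).sum

-- ===== PRECONDITION & SPEC =====
def Spec_zero_crossings (data : List Int) (median : Int) (out : Int) : Prop := out = zero_crossings_alt data median
instance (data : List Int) (median : Int) (out : Int) : Decidable (Spec_zero_crossings data median out) := by unfold Spec_zero_crossings; infer_instance

-- ===== CLAIM (what is proved, stated in full; the proofs are below) =====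
def Claim_equal_zero_crossings : Prop := ∀ (data : List Int) (median : Int), Dom_zero_crossings data median → Spec_zero_crossings data median (zero_crossings data median)

-- ===== LEMMAS AND PROOFS =====

-- A's crossing count, restated as a recursion over the sign list, threading the last sign
def loopS : Int → List Int → Int
  | _, [] => 0
  | rel, s :: ss =>
      (if s = -1 then (if rel > 0 then (1 : Int) else 0) else (if rel < 0 then 1 else 0)) + loopS s ss

-- B's adjacent-difference count, as a direct recursion
def pairsum : List Int → Int
  | [] => 0
  | [_] => 0
  | a :: b :: t => (if a ≠ b then (1 : Int) else 0) + pairsum (b :: t)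

def signsOf (data : List Int) (median : Int) : List Int :=
  data.filterMap (fun x =>
    if x < median ∨ x > median then some (if x < median then (-1 : Int) else 1) else none)

lemma signsOf_cons (x : Int) (data : List Int) (median : Int) :
    signsOf (x :: data) median =
      (if x < median ∨ x > median then [if x < median then (-1 : Int) else 1] else []) ++ signsOf data median := by
  simp [signsOf, List.filterMap_cons]
  split_ifs <;> simp

lemma signsOf_mem (data : List Int) (median : Int) :
    ∀ s ∈ signsOf data median, s = -1 ∨ s = 1 := by
  intro s hs
  rcases List.mem_filterMap.mp hs with ⟨x, _, hx⟩
  split_ifs at hx with h1 h2 <;> simp_all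

-- A's foldl equals the accumulated count plus loopS on the sign list
lemma foldl_eq_loopS (median : Int) (data : List Int) :
    ∀ rel c, (data.foldl (fun (s : Int × Int) x =>
      if x < median then (-1, if s.1 > 0 then s.2 + 1 else s.2)
      else if x > median then (1, if s.1 < 0 then s.2 + 1 else s.2)
      else s) (rel, c)).2 = c + loopS rel (signsOf data median) := by
  induction data with
  | nil => intro rel c; simp [signsOf, loopS]
  | cons x t ih =>
      intro rel c
      rw [List.foldl_cons, signsOf_cons]
      by_cases h1 : x < median
      · simp only [if_pos h1, if_pos (Or.inl h1)]
        rw [ih]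
        simp [loopS]
        split_ifs <;> omega
      · by_cases h2 : x > median
        · simp only [if_neg h1, if_pos h2, if_pos (Or.inr h2)]
          rw [ih]
          have : ¬ (x < median) := h1
          simp [loopS]
          split_ifs <;> omega
        · have : ¬ (x < median ∨ x > median) := by omega
          simp only [if_neg h1, if_neg h2, if_neg this, List.nil_append]
          exact ih rel c

-- B's zip-sum equals pairsum
lemma zipsum_eq_pairsum (ss : List Int) :
    ((ss.zip ss.tail).map (fun p => if p.1 ≠ p.2 then (1 : Int) else 0)).sum = pairsum ss := by
  match ss with
  | [] => simp [pairsum]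
  | [a] => simp [pairsum]
  | a :: b :: t =>
      have ih := zipsum_eq_pairsum (b :: t)
      simp only [List.tail_cons, List.zip_cons_cons, List.map_cons, List.sum_cons, pairsum] at ih ⊢
      rw [ih]

-- on a list of ±1 signs, loopS from a ±1 previous sign is pairsum with that sign prepended
lemma loopS_sign (ss : List Int) (h : ∀ s ∈ ss, s = -1 ∨ s = 1) :
    ∀ rel, (rel = -1 ∨ rel = 1) → loopS rel ss = pairsum (rel :: ss) := by
  induction ss with
  | nil => intro rel _; simp [loopS, pairsum]
  | cons s t ih =>
      intro rel hrel
      have hs : s = -1 ∨ s = 1 := h s (by simp)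
      have ht : ∀ u ∈ t, u = -1 ∨ u = 1 := fun u hu => h u (by simp [hu])
      rw [loopS, pairsum, ih ht s hs]
      rcases hs with rfl | rfl <;> rcases hrel with rfl | rfl <;> norm_num

-- starting from rel = 0 drops the prepended sign
lemma loopS_zero (ss : List Int) (h : ∀ s ∈ ss, s = -1 ∨ s = 1) :
    loopS 0 ss = pairsum ss := by
  match ss with
  | [] => simp [loopS, pairsum]
  | s :: t =>
      have hs : s = -1 ∨ s = 1 := h s (by simp)
      have ht : ∀ u ∈ t, u = -1 ∨ u = 1 := fun u hu => h u (by simp [hu])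
      rw [loopS, loopS_sign t ht s hs]
      rcases hs with rfl | rfl <;> norm_num

-- ===== VERDICT (by name: the statement is the Claim_ definition above) =====
theorem zero_crossings_spec : Claim_equal_zero_crossings := by
  intro data median _
  unfold Spec_zero_crossings zero_crossings zero_crossings_alt
  rw [foldl_eq_loopS, loopS_zero _ (signsOf_mem data median), ← zipsum_eq_pairsum]
  simp [signsOf]
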